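-- pv_equiv track=rewrite | github.com/jocoder22/PythonProject | problem1.py | dailyMargin
-- ===== SOURCE A (Python) =====
-- import operator
--
-- def dailyMargin(prices_day):
--
--     max_margin = 0
--     margin_list = {}
--
--     for i in range(len(prices_day) - 1):
--         price_diff = prices_day[i+1] - prices_day[i]
--         margin_list['Day '+str(1+i)] = price_diff
--         max_margin = max(max_margin, price_diff)
--
--     max_dic = max(margin_list.items(), key=operator.itemgetter(1))
--
--     return max_dic, margin_list
-- ===== SOURCE B (Python) =====
-- def dailyMargin(prices_day):
--     # build the keyed consecutive-difference pairs in one comprehension,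
--     # then pick the best by a stable descending sort on the value: with
--     # reverse=True Python's stable sort keeps insertion order among equal
--     # values, so pairs[...] sorted descending starts with the FIRST maximal
--     # pair -- exactly max(items, key=itemgetter(1)).
--     pairs = [('Day ' + str(i), b - a)
--              for i, (a, b) in enumerate(zip(prices_day, prices_day[1:]), 1)]
--     best = sorted(pairs, key=lambda p: p[1], reverse=True)[0]
--     return best, dict(pairs)
-- ===== Notes on version B (the rewrite author's own statement) =====
-- stated objective: alternative
-- what changed: B builds the keyed difference pairs in one comprehension over enumerate(zip(...)) and selects the answer by a stable descending sort on the value (first element = first maximal pair), instead of A's index loop building a dict plus a separate linear max() scan over its items.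
-- outside the precondition, e.g. on dailyMargin([]): A raises ValueError, B raises IndexError; on dailyMargin([5]): A raises ValueError, B raises IndexError
import Mathlib
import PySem

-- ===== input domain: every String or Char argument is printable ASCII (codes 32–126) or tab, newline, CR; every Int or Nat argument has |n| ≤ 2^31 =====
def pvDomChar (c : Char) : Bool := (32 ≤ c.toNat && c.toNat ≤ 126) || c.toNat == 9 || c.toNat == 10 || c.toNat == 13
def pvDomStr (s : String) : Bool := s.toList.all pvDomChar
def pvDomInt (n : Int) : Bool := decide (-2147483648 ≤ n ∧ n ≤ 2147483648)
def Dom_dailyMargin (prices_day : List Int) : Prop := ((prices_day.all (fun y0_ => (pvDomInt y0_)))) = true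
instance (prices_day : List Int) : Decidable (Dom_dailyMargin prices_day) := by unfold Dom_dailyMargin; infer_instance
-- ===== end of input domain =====

-- B replaces A's build-dict-then-linear-max with a comprehension over enumerate(zip(...)) followed by a stable descending sort whose first element is the answer (alternative decomposition, not faster).

-- ===== PORT A =====
-- the loop indices i and i+1 are always in range here, so pyGetD with default 0 is exact
def dailyMargin (prices_day : List Int) : (String × Int) × (List (String × Int)) :=
  let st :=
    (PySem.List.pyRange 0 ((prices_day.length : Int) - 1) 1).foldl
      (fun (st : Int × PySem.Dict String Int) i =>
        let price_diff := PySem.List.pyGetD prices_day (i + 1) 0 - PySem.List.pyGetD prices_day i 0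
        (max st.1 price_diff, st.2.insert ("Day " ++ PySem.Int.toStr (1 + i)) price_diff))
      (0, PySem.Dict.empty)
  -- max(margin_list.items(), key=itemgetter(1)); none = ValueError on the empty dict, excluded by Pre_
  let max_dic := (PySem.List.max? st.2.items (fun p => p.2)).getD ("", 0)
  (max_dic, st.2.items)

-- ===== PORT B =====
def dailyMargin_alt (prices_day : List Int) : (String × Int) × (List (String × Int)) :=
  let pairs :=
    (PySem.List.enumerate (prices_day.zip (PySem.List.slice prices_day (some 1) none)) 1).map
      (fun p => ("Day " ++ PySem.Int.toStr p.1, p.2.2 - p.2.1))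
  -- sorted(pairs, key=..., reverse=True)[0]; [0] of the empty list = IndexError, excluded by Pre_
  let best := (PySem.List.sorted pairs (fun p => p.2) true).headD ("", 0)
  (best, (pairs.foldl (fun (d : PySem.Dict String Int) p => d.insert p.1 p.2) PySem.Dict.empty).items)

-- ===== PRECONDITION & SPEC =====
-- Pre_ excludes lists of length < 2: there A raises ValueError (max() of an empty sequence) and B raises IndexError.
def Pre_dailyMargin (prices_day : List Int) : Prop := 2 ≤ prices_day.length
instance (prices_day : List Int) : Decidable (Pre_dailyMargin prices_day) := by unfold Pre_dailyMargin; infer_instance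
def pvWitness_dailyMargin : List Int := [3, 7, 4]

def Spec_dailyMargin (prices_day : List Int) (out : (String × Int) × (List (String × Int))) : Prop := out = dailyMargin_alt prices_day
instance (prices_day : List Int) (out : (String × Int) × (List (String × Int))) : Decidable (Spec_dailyMargin prices_day out) := by unfold Spec_dailyMargin; infer_instance

-- ===== CLAIM (what is proved, stated in full; the proofs are below) =====
def Claim_equal_dailyMargin : Prop := ∀ (prices_day : List Int), Dom_dailyMargin prices_day → Pre_dailyMargin prices_day → Spec_dailyMargin prices_day (dailyMargin prices_day)

-- ===== LEMMAS AND PROOFS =====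

-- the keyed list of consecutive differences both programs produce
def pvL (xs : List Int) : List (String × Int) :=
  (List.range (xs.length - 1)).map
    (fun k => ("Day " ++ PySem.Int.toStr ((1 + k : Nat) : Int), xs.getD (k + 1) 0 - xs.getD k 0))

-- digit characters below base 10 are distinct
lemma pv_digitChar_inj {m n : Nat} (hm : m < 10) (hn : n < 10)
    (h : Nat.digitChar m = Nat.digitChar n) : m = n := by
  interval_cases m <;> interval_cases n <;> simp_all [Nat.digitChar]

-- decimal prints of naturals are distinct
lemma pv_toDigits_inj : ∀ m n : Nat, Nat.toDigits 10 m = Nat.toDigits 10 n → m = n := by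
  intro m
  induction m using Nat.strong_induction_on with
  | _ m ih =>
    intro n h
    by_cases hm : m < 10 <;> by_cases hn : n < 10
    · rw [Nat.toDigits_of_lt_base hm, Nat.toDigits_of_lt_base hn] at h
      exact pv_digitChar_inj hm hn (List.singleton_injective h)
    · exfalso
      rw [Nat.toDigits_of_lt_base hm,
          Nat.toDigits_of_base_le (by norm_num) (le_of_not_gt hn)] at h
      have hl := congrArg List.length h
      have hp := @Nat.length_toDigits_pos 10 (n / 10)
      simp only [List.length_append, List.length_cons, List.length_nil] at hl
      omega
    · exfalso
      rw [Nat.toDigits_of_lt_base hn,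
          Nat.toDigits_of_base_le (by norm_num) (le_of_not_gt hm)] at h
      have hl := congrArg List.length h
      have hp := @Nat.length_toDigits_pos 10 (m / 10)
      simp only [List.length_append, List.length_cons, List.length_nil] at hl
      omega
    · rw [Nat.toDigits_of_base_le (by norm_num) (le_of_not_gt hm),
          Nat.toDigits_of_base_le (by norm_num) (le_of_not_gt hn)] at h
      have hlen : (Nat.toDigits 10 (m / 10)).length = (Nat.toDigits 10 (n / 10)).length := by
        have := congrArg List.length h
        simp only [List.length_append, List.length_cons, List.length_nil] at this
        omega
      obtain ⟨h3, h4⟩ := List.append_inj h hlen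
      have hdiv : m / 10 = n / 10 :=
        ih (m / 10) (Nat.div_lt_self (by omega) (by norm_num)) _ h3
      have hmod : m % 10 = n % 10 :=
        pv_digitChar_inj (Nat.mod_lt _ (by norm_num)) (Nat.mod_lt _ (by norm_num))
          (List.singleton_injective h4)
      omega

lemma pv_toStr_nat_inj (m n : Nat) (h : PySem.Int.toStr (m : Int) = PySem.Int.toStr (n : Int)) :
    m = n := by
  have h' := congrArg String.toList h
  rw [PySem.Int.toList_toStr, PySem.Int.toList_toStr] at h'
  simp only [PySem.Int.toChars] at h'
  have hm : ¬ ((m : Int) < 0) := by omega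
  have hn : ¬ ((n : Int) < 0) := by omega
  rw [if_neg hm, if_neg hn] at h'
  exact pv_toDigits_inj _ _ (by simpa using h')

-- the day labels are pairwise distinct
lemma pvKey_inj : Function.Injective (fun k : Nat => "Day " ++ PySem.Int.toStr ((1 + k : Nat) : Int)) := by
  intro a b h
  have h' := congrArg String.toList h
  rw [String.toList_append, String.toList_append] at h'
  have h2 : (PySem.Int.toStr ((1 + a : Nat) : Int)).toList
      = (PySem.Int.toStr ((1 + b : Nat) : Int)).toList := List.append_cancel_left h'
  have h3 : PySem.Int.toStr ((1 + a : Nat) : Int) = PySem.Int.toStr ((1 + b : Nat) : Int) := by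
    have := congrArg String.ofList h2
    simpa using this
  have := pv_toStr_nat_inj _ _ h3
  omega

lemma pvL_keys_nodup (xs : List Int) : ((pvL xs).map Prod.fst).Nodup := by
  unfold pvL
  rw [List.map_map]
  exact (List.nodup_range).map pvKey_inj

lemma pv_cast1 (n : Nat) : ((n : Int) + 1) = ((n + 1 : Nat) : Int) := by push_cast; ring

lemma pv_cast2 (n : Nat) : (1 + (n : Int)) = ((1 + n : Nat) : Int) := by push_cast; ring

-- a foldl with a componentwise product state splits into two folds
lemma pv_foldl_split {α β γ : Type} (f : α → γ → α) (g : β → γ → β) :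
    ∀ (l : List γ) (a : α) (b : β),
      l.foldl (fun st c => (f st.1 c, g st.2 c)) (a, b) = (l.foldl f a, l.foldl g b) := by
  intro l
  induction l with
  | nil => intro a b; rfl
  | cons x t ih => intro a b; simpa using ih (f a x) (g b x)

-- the items of a fresh-key insertion fold over pvL are pvL itself
lemma pv_items_eq (xs : List Int) :
    ((pvL xs).foldl (fun (d : PySem.Dict String Int) p => d.insert p.1 p.2) PySem.Dict.empty).items
      = pvL xs := by
  have h := PySem.Dict.items_foldl_insert_fresh (pvL xs) Prod.fst Prod.snd PySem.Dict.empty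
    (fun a _ => PySem.Dict.contains_empty _) (pvL_keys_nodup xs)
  simpa using h

-- characterisation of A's result
lemma pv_A_eq (xs : List Int) :
    dailyMargin xs = ((PySem.List.max? (pvL xs) (fun p => p.2)).getD ("", 0), pvL xs) := by
  have hlen : (((xs.length : Int) - 1) - 0).toNat = xs.length - 1 := by omega
  unfold dailyMargin
  rw [PySem.List.pyRange_one, hlen, List.foldl_map]
  simp only [zero_add]
  simp only [pv_cast1, pv_cast2, PySem.List.pyGetD_natCast]
  rw [pv_foldl_split (fun (a : Int) k => max a (xs.getD (k + 1) 0 - xs.getD k 0))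
        (fun (b : PySem.Dict String Int) k =>
          b.insert ("Day " ++ PySem.Int.toStr ((1 + k : Nat) : Int)) (xs.getD (k + 1) 0 - xs.getD k 0))]
  have hitems : ((List.range (xs.length - 1)).foldl
      (fun (d : PySem.Dict String Int) k =>
        d.insert ("Day " ++ PySem.Int.toStr ((1 + k : Nat) : Int)) (xs.getD (k + 1) 0 - xs.getD k 0))
      PySem.Dict.empty).items = pvL xs := by
    have h := PySem.Dict.items_foldl_insert_fresh (List.range (xs.length - 1))
      (fun k => "Day " ++ PySem.Int.toStr ((1 + k : Nat) : Int))
      (fun k => xs.getD (k + 1) 0 - xs.getD k 0) PySem.Dict.empty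
      (fun a _ => PySem.Dict.contains_empty _) (List.nodup_range.map pvKey_inj)
    simpa [pvL] using h
  rw [hitems]

-- the keyed pair list as B's enumerate/zip loop traverses it
def pvKeyed (prev : Int) (rest : List Int) (s : Nat) : List (String × Int) :=
  match rest with
  | [] => []
  | cur :: t => ("Day " ++ PySem.Int.toStr ((1 + s : Nat) : Int), cur - prev) :: pvKeyed cur t (s + 1)

lemma pv_zipmap : ∀ (rest : List Int) (prev : Int) (s : Nat),
    (PySem.List.enumerate ((prev :: rest).zip rest) ((1 + s : Nat) : Int)).map
        (fun p => ("Day " ++ PySem.Int.toStr p.1, p.2.2 - p.2.1))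
      = pvKeyed prev rest s := by
  intro rest
  induction rest with
  | nil => intro prev s; rfl
  | cons cur t ih =>
    intro prev s
    rw [List.zip_cons_cons, PySem.List.enumerate_cons, List.map_cons]
    have hs : ((1 + s : Nat) : Int) + 1 = ((1 + (s + 1) : Nat) : Int) := by push_cast; ring
    rw [hs]
    simp only [pvKeyed]
    exact congrArg _ (ih cur (s + 1))

lemma pv_keyed_gen : ∀ (rest : List Int) (prev : Int) (s : Nat),
    pvKeyed prev rest s = (List.range rest.length).map
      (fun k => ("Day " ++ PySem.Int.toStr ((1 + (s + k) : Nat) : Int),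
                 (prev :: rest).getD (k + 1) 0 - (prev :: rest).getD k 0)) := by
  intro rest
  induction rest with
  | nil => intro prev s; rfl
  | cons cur t ih =>
    intro prev s
    rw [List.length_cons, List.range_succ_eq_map, List.map_cons, List.map_map]
    simp only [pvKeyed]
    congr 1
    rw [ih cur (s + 1)]
    apply List.map_congr_left
    intro k hk
    simp only [Function.comp_apply, Nat.succ_eq_add_one, List.getD_cons_succ]
    have h1 : 1 + (s + 1 + k) = 1 + (s + (k + 1)) := by omega
    rw [h1]

lemma pv_keyed_eq_pvL (rest : List Int) (prev : Int) :
    pvKeyed prev rest 0 = pvL (prev :: rest) := by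
  rw [pv_keyed_gen]
  unfold pvL
  simp only [List.length_cons, Nat.add_sub_cancel]
  apply List.map_congr_left
  intro k hk
  simp only [Nat.zero_add]

-- the comparison B's descending sort uses
def pvBf (p q : String × Int) : Bool := decide (q.2 < p.2)

-- insertBy never shortens to nil: expose the head/tail shape
lemma pv_insertBy_shape (x h : String × Int) (t : List (String × Int)) :
    ∃ r, PySem.List.insertBy pvBf x (h :: t) = (if h.2 < x.2 then x else h) :: r := by
  by_cases hb : h.2 < x.2
  · exact ⟨h :: t, by simp [PySem.List.insertBy, pvBf, hb]⟩
  · exact ⟨PySem.List.insertBy pvBf x t, by simp [PySem.List.insertBy, pvBf, hb]⟩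

-- the head of the descending insertion-sort fold is the first-maximal running fold
lemma pv_fold_head : ∀ (t : List (String × Int)) (h : String × Int) (rest : List (String × Int)) (d : String × Int),
    ((t.foldl (fun acc x => PySem.List.insertBy pvBf x acc) (h :: rest))).headD d
      = t.foldl (fun m x => if m.2 < x.2 then x else m) h := by
  intro t
  induction t with
  | nil => intro h rest d; rfl
  | cons x t' ih =>
    intro h rest d
    obtain ⟨r, hr⟩ := pv_insertBy_shape x h rest
    simp only [List.foldl_cons, hr]
    exact ih _ r d

-- a foldl on an Option accumulator that stays some is the some of a scalar fold
lemma pv_foldl_option {α : Type} (f : Option α → α → Option α) (g : α → α → α)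
    (hf : ∀ m x, f (some m) x = some (g m x)) :
    ∀ (t : List α) (m : α), t.foldl f (some m) = some (t.foldl g m) := by
  intro t
  induction t with
  | nil => intro m; rfl
  | cons x t' ih => intro m; rw [List.foldl_cons, hf, List.foldl_cons]; exact ih (g m x)

-- head of the stable descending sort = Python's first-maximal max()
lemma pv_sorted_head (l : List (String × Int)) :
    (PySem.List.sorted l (fun p => p.2) true).headD ("", 0)
      = (PySem.List.max? l (fun p => p.2)).getD ("", 0) := by
  cases l with
  | nil => rfl
  | cons p t =>
    rw [PySem.List.sorted_rev_eq_foldl_insertBy]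
    have hbf : (fun a b : String × Int => decide ((fun p : String × Int => p.2) b < (fun p => p.2) a)) = pvBf := by
      funext a b; rfl
    rw [hbf]
    simp only [List.foldl_cons]
    have h1 : PySem.List.insertBy pvBf p [] = [p] := rfl
    rw [h1, pv_fold_head]
    unfold PySem.List.max?
    simp only [List.foldl_cons]
    rw [pv_foldl_option _ (fun m x : String × Int => if m.2 < x.2 then x else m) (by intro m x; by_cases h : m.2 < x.2 <;> simp [h])]
    rfl

-- characterisation of B's result
lemma pv_B_eq (xs : List Int) :
    dailyMargin_alt xs = ((PySem.List.max? (pvL xs) (fun p => p.2)).getD ("", 0), pvL xs) := by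
  cases xs with
  | nil => rfl
  | cons p rest =>
    have hpairs : (PySem.List.enumerate ((p :: rest).zip (PySem.List.slice (p :: rest) (some 1) none)) 1).map
        (fun q => ("Day " ++ PySem.Int.toStr q.1, q.2.2 - q.2.1)) = pvL (p :: rest) := by
      rw [PySem.List.slice_from_one]
      have h1 : (1 : Int) = ((1 + 0 : Nat) : Int) := by norm_num
      rw [List.tail_cons, h1, pv_zipmap rest p 0, pv_keyed_eq_pvL]
    simp only [dailyMargin_alt]
    rw [hpairs, pv_sorted_head, pv_items_eq]

-- ===== VERDICT (by name: the statement is the Claim_ definition above) =====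
theorem dailyMargin_spec : Claim_equal_dailyMargin := by
  intro xs _ _
  unfold Spec_dailyMargin
  rw [pv_A_eq, pv_B_eq]
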